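-- pv_equiv track=rewrite | github.com/Aishaouadah/Search-engine | Moteur-de-recherche--main/vectoriel_model.py | calculate_terms_query_value
-- ===== SOURCE A (Python) =====
-- from typing import DefaultDict
--
-- def calculate_terms_query_value(query , all_terms):
--     #query = get_terms_query(query)
--     dict =  DefaultDict()
--     for term in all_terms:
--         if term in query:
--             dict[term] = 1
--         else:
--             dict[term] = 0
--     return dict
-- ===== SOURCE B (Python) =====
-- def calculate_terms_query_value(query, all_terms):
--     d = {term: 0 for term in all_terms}
--     for t in query:
--         if t in d:
--             d[t] = 1
--     return d
-- ===== Notes on version B (the rewrite author's own statement) =====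
-- stated objective: faster
-- what changed: Instead of one pass over all_terms that scans the query list for each term, B builds the whole dict with every term mapped to 0 and then makes a second pass over query upgrading keys present in the dict to 1, replacing the per-term list scan by a dict membership test.
import Mathlib
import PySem

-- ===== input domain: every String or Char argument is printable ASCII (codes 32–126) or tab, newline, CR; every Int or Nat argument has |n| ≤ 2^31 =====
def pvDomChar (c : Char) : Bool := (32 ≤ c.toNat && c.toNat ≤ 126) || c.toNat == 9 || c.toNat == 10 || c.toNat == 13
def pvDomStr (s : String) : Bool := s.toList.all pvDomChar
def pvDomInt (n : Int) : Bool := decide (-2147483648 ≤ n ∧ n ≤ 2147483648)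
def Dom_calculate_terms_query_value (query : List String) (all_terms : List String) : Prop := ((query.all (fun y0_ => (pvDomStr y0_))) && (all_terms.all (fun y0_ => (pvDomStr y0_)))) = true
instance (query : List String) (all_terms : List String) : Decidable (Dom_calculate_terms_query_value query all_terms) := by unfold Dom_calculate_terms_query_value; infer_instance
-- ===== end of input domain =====

-- B replaces A's per-term scan of the query list by initializing every term to 0 and then upgrading query terms present in the dict to 1 (faster: dict membership instead of a list scan per term).


-- ===== PORT A =====
-- one branched pass over all_terms: each term is inserted with 1 if it occurs in query, else 0
def calculate_terms_query_value (query : List String) (all_terms : List String) : List (String × Int) :=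
  (all_terms.foldl
      (fun d term => if query.contains term then d.insert term 1 else d.insert term 0)
      PySem.Dict.empty).items

-- ===== PORT B =====
-- B: first map every term of all_terms to 0, then a second pass over query sets keys present in the dict to 1
def calculate_terms_query_value_alt (query : List String) (all_terms : List String) : List (String × Int) :=
  let d0 : PySem.Dict String Int := all_terms.foldl (fun d term => d.insert term 0) PySem.Dict.empty
  (query.foldl (fun d t => if d.contains t then d.insert t 1 else d) d0).items

-- ===== PRECONDITION & SPEC =====
def Spec_calculate_terms_query_value (query : List String) (all_terms : List String) (out : List (String × Int)) : Prop := out = calculate_terms_query_value_alt query all_terms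
instance (query : List String) (all_terms : List String) (out : List (String × Int)) : Decidable (Spec_calculate_terms_query_value query all_terms out) := by unfold Spec_calculate_terms_query_value; infer_instance

-- ===== CLAIM (what is proved, stated in full; the proofs are below) =====
def Claim_equal_calculate_terms_query_value : Prop := ∀ (query : List String) (all_terms : List String), Dom_calculate_terms_query_value query all_terms → Spec_calculate_terms_query_value query all_terms (calculate_terms_query_value query all_terms)

-- ===== LEMMAS AND PROOFS =====

-- insert-with-a-key-determined-value loop: items are the first-occurrence dedup paired with the value
theorem items_foldl_insert_fn (g : String → Int) (l : List String) :
    (l.foldl (fun d t => d.insert t (g t)) (PySem.Dict.empty : PySem.Dict String Int)).items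
      = (PySem.Set.ofList l).map (fun t => (t, g t)) := by
  induction l using List.reverseRecOn with
  | nil => rfl
  | append_singleton l t ih =>
    rw [List.foldl_append, List.foldl_cons, List.foldl_nil,
        PySem.Set.ofList_eq_foldl, List.foldl_append, List.foldl_cons, List.foldl_nil,
        ← PySem.Set.ofList_eq_foldl]
    set D := l.foldl (fun d t => d.insert t (g t)) (PySem.Dict.empty : PySem.Dict String Int) with hD
    have hkeys : D.keys = PySem.Set.ofList l := by
      unfold PySem.Dict.keys; rw [ih, List.map_map]; simp [Function.comp_def]
    by_cases h : t ∈ PySem.Set.ofList l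
    · have hc : D.contains t = true := by rw [PySem.Dict.contains_iff_mem_keys, hkeys]; exact h
      rw [PySem.Dict.items_insert_of_contains _ _ hc, ih, List.map_map,
          PySem.Set.add_of_mem h]
      refine List.map_congr_left (fun x _ => ?_)
      simp only [Function.comp_def]
      by_cases hx : x = t
      · simp [hx]
      · simp [beq_iff_eq, hx]
    · have hc : D.contains t = false := by
        rw [Bool.eq_false_iff]
        intro hh
        exact h (hkeys ▸ (PySem.Dict.contains_iff_mem_keys D t).mp hh)
      rw [PySem.Dict.items_insert_of_not_contains _ _ hc, ih,
          PySem.Set.add_of_not_mem h, List.map_append]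
      rfl

-- the upgrade loop of B: keys are unchanged, every key occurring in q gets value 1
theorem items_upgrade_loop (q : List String) (d : PySem.Dict String Int) :
    (q.foldl (fun d t => if d.contains t then d.insert t 1 else d) d).items
      = d.items.map (fun p => if p.1 ∈ q then (p.1, (1 : Int)) else p) := by
  induction q generalizing d with
  | nil => simp
  | cons t q ih =>
    rw [List.foldl_cons, ih]
    by_cases h : d.contains t = true
    · rw [if_pos h, PySem.Dict.items_insert_of_contains _ _ h, List.map_map]
      refine List.map_congr_left (fun p _ => ?_)
      simp only [Function.comp_def]
      by_cases hp : p.1 = t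
      · simp [hp]
      · simp [hp, beq_iff_eq, List.mem_cons]
    · rw [if_neg h]
      refine List.map_congr_left (fun p hp => ?_)
      have hne : p.1 ≠ t := by
        intro he
        exact h ((PySem.Dict.contains_iff_mem_keys d t).mpr
          (he ▸ PySem.Dict.mem_keys_of_mem_items d hp))
      simp [List.mem_cons, hne]

-- ===== VERDICT (by name: the statement is the Claim_ definition above) =====
theorem calculate_terms_query_value_spec : Claim_equal_calculate_terms_query_value := by
  intro query all_terms _
  unfold Spec_calculate_terms_query_value
  unfold calculate_terms_query_value calculate_terms_query_value_alt
  have hA : (fun (d : PySem.Dict String Int) term =>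
        if query.contains term then d.insert term 1 else d.insert term 0)
      = (fun d term => d.insert term (if term ∈ query then 1 else 0)) := by
    funext d term
    by_cases h : term ∈ query
    · simp [h]
    · simp [h]
  rw [hA, items_foldl_insert_fn (fun t => if t ∈ query then 1 else 0) all_terms,
      items_upgrade_loop, items_foldl_insert_fn (fun _ => (0 : Int)) all_terms,
      List.map_map]
  refine List.map_congr_left (fun t _ => ?_)
  simp only [Function.comp_def]
  by_cases h : t ∈ query <;> simp [h]
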